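-- pv_equiv track=rewrite | github.com/ZviBaratz/gnome-extension-reviewer | skills/ego-lint/scripts/check-init.py | extract_module_scope_lines
-- ===== SOURCE A (Python) =====
-- def extract_module_scope_lines(content_lines):
--     """Extract lines that are at module scope (outside any class/function body).
--
--     Returns a list of (original_lineno, line_text) tuples.
--     Uses brace-depth tracking: depth 0 = module scope.
--     """
--     module_lines = []
--     depth = 0
--     for lineno, line in enumerate(content_lines, 1):
--         if depth == 0:
--             module_lines.append((lineno, line))
--         # Track brace depth (simple heuristic — doesn't handle braces in strings,
--         # but strip_comments has already removed comments)
--         depth += line.count('{') - line.count('}')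
--         if depth < 0:
--             depth = 0
--     return module_lines
-- ===== SOURCE B (Python) =====
-- def extract_module_scope_lines(content_lines):
--     """Prefix-sum formulation: the clamped brace depth before line i equals
--     S[i-1] - min(S[0..i-1]), where S are prefix sums of the per-line brace
--     deltas; hence a line is at module scope iff its preceding prefix sum is a
--     running minimum of the prefix sums.  No clamped walk is performed."""
--     prefix = [0]
--     for line in content_lines:
--         prefix.append(prefix[-1] + line.count('{') - line.count('}'))
--     runmin = []
--     m = prefix[0]
--     for s in prefix:
--         if s < m:
--             m = s
--         runmin.append(m)
--     return [(i + 1, line)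
--             for i, (line, s, m) in enumerate(zip(content_lines, prefix, runmin))
--             if s == m]
-- ===== Notes on version B (the rewrite author's own statement) =====
-- stated objective: alternative
-- what changed: Replaces A's clamped depth walk (depth += braces, clamp at 0, collect while depth==0) by an unclamped prefix-sum characterization: build the prefix sums of per-line brace deltas and their running minima, then keep exactly the lines whose preceding prefix sum is a running minimum (clamped depth = S - runmin, so depth 0 iff S == runmin).
import Mathlib
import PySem

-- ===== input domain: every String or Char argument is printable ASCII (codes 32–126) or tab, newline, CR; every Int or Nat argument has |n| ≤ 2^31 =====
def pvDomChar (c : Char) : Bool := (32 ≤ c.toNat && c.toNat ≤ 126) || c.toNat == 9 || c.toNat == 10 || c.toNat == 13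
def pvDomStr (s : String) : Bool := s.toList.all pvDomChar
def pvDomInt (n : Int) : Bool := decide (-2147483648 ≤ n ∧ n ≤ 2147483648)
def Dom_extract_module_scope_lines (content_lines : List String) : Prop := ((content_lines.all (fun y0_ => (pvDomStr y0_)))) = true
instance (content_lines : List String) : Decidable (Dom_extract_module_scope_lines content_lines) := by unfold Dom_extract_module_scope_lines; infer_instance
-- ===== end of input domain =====

-- B replaces A's clamped depth walk by a prefix-sum/running-minimum characterization (alternative algorithm, same cost).


-- ===== PORT A =====
-- for lineno, line in enumerate(content_lines, 1): collect if depth == 0, then update depth, clamping at 0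
def extract_module_scope_lines (content_lines : List String) : List (Int × String) :=
  ((PySem.List.enumerate content_lines 1).foldl
    (fun (st : List (Int × String) × Int) p =>
      let module_lines := if st.2 == 0 then st.1 ++ [p] else st.1
      let depth := st.2 + (PySem.Str.count p.2 "{" : Int) - (PySem.Str.count p.2 "}" : Int)
      (module_lines, if depth < 0 then 0 else depth))
    ([], 0)).1

-- ===== PORT B =====
-- per-line brace delta: line.count('{') - line.count('}')
def pvDelta (line : String) : Int :=
  (PySem.Str.count line "{" : Int) - (PySem.Str.count line "}" : Int)

-- pass 1 of Source B: prefix = [0]; for line: prefix.append(prefix[-1] + delta)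
def pvPrefixLoop (lines : List String) (acc : List Int) : List Int :=
  match lines with
  | [] => acc
  | l :: rest => pvPrefixLoop rest (acc ++ [(acc.getLast?.getD 0) + pvDelta l])

-- pass 2 of Source B: m = prefix[0]; for s in prefix: if s < m: m = s; runmin.append(m)
def pvRunminLoop (xs : List Int) (m : Int) (acc : List Int) : List Int :=
  match xs with
  | [] => acc
  | s :: rest =>
      let m' := if s < m then s else m
      pvRunminLoop rest m' (acc ++ [m'])

-- final comprehension of Source B over enumerate(zip(content_lines, prefix, runmin)); zip3 ported as nested pairs
def extract_module_scope_lines_alt (content_lines : List String) : List (Int × String) :=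
  let pfx := pvPrefixLoop content_lines [0]
  let runmin := pvRunminLoop pfx (pfx.headD 0) []
  (PySem.List.enumerate (content_lines.zip (pfx.zip runmin)) 0).filterMap
    (fun p => if p.2.2.1 == p.2.2.2 then some (p.1 + 1, p.2.1) else none)

-- ===== PRECONDITION & SPEC =====
def Spec_extract_module_scope_lines (content_lines : List String) (out : List (Int × String)) : Prop := out = extract_module_scope_lines_alt content_lines
instance (content_lines : List String) (out : List (Int × String)) : Decidable (Spec_extract_module_scope_lines content_lines out) := by unfold Spec_extract_module_scope_lines; infer_instance

-- ===== CLAIM (what is proved, stated in full; the proofs are below) =====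
def Claim_equal_extract_module_scope_lines : Prop := ∀ (content_lines : List String), Dom_extract_module_scope_lines content_lines → Spec_extract_module_scope_lines content_lines (extract_module_scope_lines content_lines)

-- ===== LEMMAS AND PROOFS =====

-- pure recursive form of pass 1 (prefix sums after each line, starting sum s)
def pvPrefRec (lines : List String) (s : Int) : List Int :=
  match lines with
  | [] => []
  | l :: rest => (s + pvDelta l) :: pvPrefRec rest (s + pvDelta l)

-- pure recursive form of pass 2 (running minima, current minimum m)
def pvMinRec (xs : List Int) (m : Int) : List Int :=
  match xs with
  | [] => []
  | s :: rest =>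
      let m' := if s < m then s else m
      m' :: pvMinRec rest m'

lemma pvPrefixLoop_eq (lines : List String) : ∀ (acc : List Int), acc ≠ [] →
    pvPrefixLoop lines acc = acc ++ pvPrefRec lines (acc.getLast?.getD 0) := by
  induction lines with
  | nil => intro acc _; simp [pvPrefixLoop, pvPrefRec]
  | cons l rest ih =>
    intro acc hne
    have h1 : (acc ++ [(acc.getLast?.getD 0) + pvDelta l]) ≠ [] := by simp
    have h2 : ((acc ++ [(acc.getLast?.getD 0) + pvDelta l]).getLast?.getD 0)
        = (acc.getLast?.getD 0) + pvDelta l := by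
      simp [List.getLast?_append]
    rw [pvPrefixLoop, ih _ h1, h2]
    simp [pvPrefRec]

lemma pvRunminLoop_eq (xs : List Int) : ∀ (m : Int) (acc : List Int),
    pvRunminLoop xs m acc = acc ++ pvMinRec xs m := by
  induction xs with
  | nil => intro m acc; simp [pvRunminLoop, pvMinRec]
  | cons s rest ih =>
    intro m acc
    rw [pvRunminLoop, ih]
    simp [pvMinRec]

-- the core correspondence: A's clamped walk with depth = s - m (m ≤ s) collects exactly
-- the lines whose prefix sum equals the running minimum
lemma pv_key (lines : List String) : ∀ (k s m : Int) (acc : List (Int × String)), m ≤ s →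
    ((PySem.List.enumerate lines k).foldl
      (fun (st : List (Int × String) × Int) p =>
        let module_lines := if st.2 == 0 then st.1 ++ [p] else st.1
        let depth := st.2 + (PySem.Str.count p.2 "{" : Int) - (PySem.Str.count p.2 "}" : Int)
        (module_lines, if depth < 0 then 0 else depth))
      (acc, s - m)).1
    = acc ++ (PySem.List.enumerate
        (lines.zip ((s :: pvPrefRec lines s).zip (m :: pvMinRec (pvPrefRec lines s) m))) (k - 1)).filterMap
        (fun p => if p.2.2.1 == p.2.2.2 then some (p.1 + 1, p.2.1) else none) := by
  induction lines with
  | nil => intro k s m acc _; simp [PySem.List.enumerate_nil, pvPrefRec]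
  | cons line rest ih =>
    intro k s m acc hm
    have hδ : pvDelta line = (PySem.Str.count line "{" : Int) - (PySem.Str.count line "}" : Int) := rfl
    simp only [pvPrefRec, pvMinRec, List.zip_cons_cons, PySem.List.enumerate_cons,
      List.foldl_cons, List.filterMap_cons]
    have hclamp : (if s - m + (PySem.Str.count line "{" : Int) - (PySem.Str.count line "}" : Int) < 0
          then 0
          else s - m + (PySem.Str.count line "{" : Int) - (PySem.Str.count line "}" : Int))
        = (s + pvDelta line) - (if s + pvDelta line < m then s + pvDelta line else m) := by
      rw [hδ]; split_ifs <;> omega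
    have hm' : (if s + pvDelta line < m then s + pvDelta line else m) ≤ s + pvDelta line := by
      split_ifs <;> omega
    by_cases h : s = m
    · have hb : (s - m == (0 : Int)) = true := by simp [h]
      have hb2 : (s == m) = true := by simp [h]
      simp only [hb, hb2]
      rw [hclamp]
      rw [ih (k + 1) (s + pvDelta line) _ _ hm']
      have : k - 1 + 1 = k := by omega
      rw [this]
      have : k + 1 - 1 = k := by omega
      rw [this]
      simp
    · have hb : (s - m == (0 : Int)) = false := by simp; omega
      have hb2 : (s == m) = false := by simp [h]
      simp only [hb, hb2]
      rw [hclamp]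
      rw [ih (k + 1) (s + pvDelta line) _ _ hm']
      have : k + 1 - 1 = k := by omega
      rw [this]
      simp

theorem pv_main (content_lines : List String) :
    extract_module_scope_lines content_lines = extract_module_scope_lines_alt content_lines := by
  have hpre : pvPrefixLoop content_lines [0] = 0 :: pvPrefRec content_lines 0 := by
    rw [pvPrefixLoop_eq content_lines [0] (by simp)]; simp
  have hmin : pvRunminLoop (0 :: pvPrefRec content_lines 0) ((0 :: pvPrefRec content_lines 0).headD 0) []
      = (0 : Int) :: pvMinRec (pvPrefRec content_lines 0) 0 := by
    rw [pvRunminLoop_eq]; simp [pvMinRec]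
  have hk := pv_key content_lines 1 0 0 [] (le_refl 0)
  unfold extract_module_scope_lines extract_module_scope_lines_alt
  simp only [hpre, hmin]
  simpa using hk

-- ===== VERDICT (by name: the statement is the Claim_ definition above) =====
theorem extract_module_scope_lines_spec : Claim_equal_extract_module_scope_lines := by
  intro content_lines _
  unfold Spec_extract_module_scope_lines
  exact pv_main content_lines
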